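-- pv_equiv track=rewrite | github.com/Deputy1389/CiteLine | apps/worker/lib/luqa.py | _extract_appendix_b_slice
-- ===== SOURCE A (Python) =====
-- def _extract_appendix_b_slice(report_text: str) -> str:
--     low = report_text.lower()
--     start = low.find("appendix b:")
--     if start < 0:
--         return ""
--     end_candidates = [
--         low.find("appendix c:", start + 1),
--         low.find("appendix d:", start + 1),
--         low.find("appendix e:", start + 1),
--         low.find("appendix f:", start + 1),
--     ]
--     ends = [e for e in end_candidates if e > start]
--     end = min(ends) if ends else len(report_text)
--     return report_text[start:end]
-- ===== SOURCE B (Python) =====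
-- def _extract_appendix_b_slice(report_text: str) -> str:
--     low = report_text.lower()
--     start = low.find("appendix b:")
--     if start < 0:
--         return ""
--     n = len(report_text)
--     i = start + 1
--     while i < n:
--         if low[i:i+11] in ("appendix c:", "appendix d:", "appendix e:", "appendix f:"):
--             return report_text[start:i]
--         i += 1
--     return report_text[start:]
-- ===== Notes on version B (the rewrite author's own statement) =====
-- stated objective: alternative
-- what changed: Instead of running four separate whole-text find() calls for the c/d/e/f markers and taking the min of the hits, B makes a single left-to-right scan from start+1 and stops at the first position whose 11-char window is any next-appendix marker.
import Mathlib
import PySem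

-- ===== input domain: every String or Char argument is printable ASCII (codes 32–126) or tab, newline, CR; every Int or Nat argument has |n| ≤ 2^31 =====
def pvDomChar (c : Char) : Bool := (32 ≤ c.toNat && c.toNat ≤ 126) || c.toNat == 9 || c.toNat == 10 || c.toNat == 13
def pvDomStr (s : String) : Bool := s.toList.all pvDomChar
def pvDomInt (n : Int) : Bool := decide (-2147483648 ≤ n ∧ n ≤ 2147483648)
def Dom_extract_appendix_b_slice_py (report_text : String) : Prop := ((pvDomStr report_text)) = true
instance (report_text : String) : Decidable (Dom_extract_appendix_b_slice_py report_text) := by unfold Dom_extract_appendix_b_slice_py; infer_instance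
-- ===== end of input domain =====

-- B replaces A's four whole-text findFrom calls plus filter/min by one left-to-right scan that
-- stops at the first next-appendix marker after the start position (objective: alternative).

-- ===== PORT A =====
def extract_appendix_b_slice_py (report_text : String) : String :=
  let s := report_text.toList
  let low := PySem.Chars.lower s
  let start := PySem.Chars.find low "appendix b:".toList
  if start < 0 then ""
  else
    let endCandidates : List Int :=
      [PySem.Chars.findFrom low "appendix c:".toList (start + 1),
       PySem.Chars.findFrom low "appendix d:".toList (start + 1),
       PySem.Chars.findFrom low "appendix e:".toList (start + 1),
       PySem.Chars.findFrom low "appendix f:".toList (start + 1)]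
    let ends := endCandidates.filter (fun e => decide (start < e))
    let endv : Int :=
      match PySem.List.min? ends (fun x => x) with
      | some m => m
      | none => (s.length : Int)
    String.ofList (PySem.List.slice s (some start) (some endv))

-- ===== PORT B =====
-- the tuple of terminating markers B compares a sliding 11-char window with
def pvMarkers : List (List Char) :=
  ["appendix c:".toList, "appendix d:".toList, "appendix e:".toList, "appendix f:".toList]

-- B's while-loop: advance i until low[i:i+11] is one of the markers, then slice
def pvScanB (s low : List Char) (start i : Nat) : List Char :=
  if h : i < s.length then
    if pvMarkers.contains (PySem.List.slice low (some (i : Int)) (some ((i : Int) + 11))) then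
      PySem.List.slice s (some (start : Int)) (some (i : Int))
    else pvScanB s low start (i + 1)
  else PySem.List.slice s (some (start : Int)) none
termination_by s.length - i

def extract_appendix_b_slice_py_alt (report_text : String) : String :=
  let s := report_text.toList
  let low := PySem.Chars.lower s
  let start := PySem.Chars.find low "appendix b:".toList
  if start < 0 then ""
  else String.ofList (pvScanB s low start.toNat (start.toNat + 1))

-- ===== PRECONDITION & SPEC =====
def Spec_extract_appendix_b_slice_py (report_text : String) (out : String) : Prop := out = extract_appendix_b_slice_py_alt report_text
instance (report_text : String) (out : String) : Decidable (Spec_extract_appendix_b_slice_py report_text out) := by unfold Spec_extract_appendix_b_slice_py; infer_instance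

-- ===== CLAIM (what is proved, stated in full; the proofs are below) =====
def Claim_equal_extract_appendix_b_slice_py : Prop := ∀ (report_text : String), Dom_extract_appendix_b_slice_py report_text → Spec_extract_appendix_b_slice_py report_text (extract_appendix_b_slice_py report_text)

-- ===== LEMMAS AND PROOFS =====

def pvMatchAt (low : List Char) (i : Nat) : Prop := ∃ p ∈ pvMarkers, p <+: low.drop i

lemma pvContains_iff (low : List Char) (i : Nat) :
    (pvMarkers.contains (PySem.List.slice low (some (i : Int)) (some ((i : Int) + 11))) = true)
      ↔ pvMatchAt low i := by
  have hc : ((i : Int) + 11) = ((i + 11 : Nat) : Int) := by push_cast; ring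
  rw [hc, PySem.List.slice_natCast]
  have h11 : i + 11 - i = 11 := by omega
  rw [h11]
  rw [List.contains_iff_mem]
  constructor
  · intro h
    exact ⟨_, h, List.take_prefix _ _⟩
  · rintro ⟨p, hp, hpre⟩
    have hlen : p.length = 11 := by fin_cases hp <;> decide
    have := (List.prefix_iff_eq_take).mp hpre
    rw [← hlen, ← this]
    exact hp

lemma pv_infix_drop (p l : List Char) (k : Nat) :
    p <:+: l.drop k ↔ ∃ j, k ≤ j ∧ p <+: l.drop j := by
  constructor
  · intro h
    have h1 : PySem.Chars.isIn p (l.drop k) = true := (PySem.Chars.isIn_iff_infix _ _).mpr h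
    obtain ⟨j, hj⟩ := (PySem.Chars.exists_prefix_drop_iff_isIn _ _).mpr h1
    exact ⟨k + j, by omega, by rwa [List.drop_drop] at hj⟩
  · rintro ⟨j, hkj, hpre⟩
    rw [← PySem.Chars.isIn_iff_infix]
    rw [← PySem.Chars.exists_prefix_drop_iff_isIn]
    exact ⟨j - k, by rw [List.drop_drop, show k + (j - k) = j from by omega]; exact hpre⟩


lemma pvScanB_no (s low : List Char) (st i : Nat)
    (h : ∀ j, i ≤ j → j < s.length → ¬ pvMatchAt low j) :
    pvScanB s low st i = s.drop st := by
  rw [pvScanB]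
  by_cases hi : i < s.length
  · rw [dif_pos hi]
    have hcf : pvMarkers.contains (PySem.List.slice low (some (i : Int)) (some ((i : Int) + 11))) = false := by
      rw [Bool.eq_false_iff]
      intro hc
      exact h i le_rfl hi ((pvContains_iff low i).mp hc)
    rw [hcf]
    simp only [Bool.false_eq_true, if_false]
    exact pvScanB_no s low st (i + 1) (fun j hj hjn => h j (by omega) hjn)
  · rw [dif_neg hi, PySem.List.slice_from s (by positivity), Int.toNat_natCast]
termination_by s.length - i
decreasing_by omega

lemma pvScanB_yes (s low : List Char) (st i j : Nat)
    (hij : i ≤ j) (hjn : j < s.length) (hj : pvMatchAt low j)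
    (hmin : ∀ k, i ≤ k → k < j → ¬ pvMatchAt low k) :
    pvScanB s low st i = PySem.List.slice s (some (st : Int)) (some (j : Int)) := by
  rw [pvScanB, dif_pos (lt_of_le_of_lt hij hjn)]
  by_cases hi : i = j
  · subst hi
    rw [(pvContains_iff low i).mpr hj]
    simp only [if_true]
  · have hcf : pvMarkers.contains (PySem.List.slice low (some (i : Int)) (some ((i : Int) + 11))) = false := by
      rw [Bool.eq_false_iff]
      intro hc
      exact hmin i le_rfl (by omega) ((pvContains_iff low i).mp hc)
    rw [hcf]
    simp only [Bool.false_eq_true, if_false]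
    exact pvScanB_yes s low st (i + 1) j (by omega) hjn hj (fun k hk hkj => hmin k (by omega) hkj)
termination_by j - i
decreasing_by omega

lemma pv_body (s low : List Char) (start : Int) (h0 : 0 ≤ start)
    (hlen : low.length = s.length)
    (hpb : "appendix b:".toList <+: low.drop start.toNat) :
    PySem.List.slice s (some start)
      (some (match PySem.List.min?
          (([PySem.Chars.findFrom low "appendix c:".toList (start + 1),
             PySem.Chars.findFrom low "appendix d:".toList (start + 1),
             PySem.Chars.findFrom low "appendix e:".toList (start + 1),
             PySem.Chars.findFrom low "appendix f:".toList (start + 1)].filter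
               (fun e => decide (start < e)))) (fun x => x) with
        | some m => m
        | none => (s.length : Int)))
      = pvScanB s low start.toNat (start.toNat + 1) := by
  lift start to Nat using h0 with st hst
  simp only [Int.toNat_natCast] at hpb ⊢
  have harg : ((st : Int) + 1) = ((st + 1 : Nat) : Int) := by push_cast; ring
  rw [harg]
  have hb11 : st + 11 ≤ s.length := by
    have h1 := hpb.length_le
    have h2 : ("appendix b:".toList).length = 11 := by decide
    simp only [List.length_drop] at h1
    omega
  have hk : st + 1 ≤ low.length := by omega
  have hFne : ∀ p ∈ pvMarkers, PySem.Chars.findFrom low p ((st + 1 : Nat) : Int) ≠ -1 →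
      ((st + 1 : Nat) : Int) ≤ PySem.Chars.findFrom low p ((st + 1 : Nat) : Int) ∧
      p <+: low.drop (PySem.Chars.findFrom low p ((st + 1 : Nat) : Int)).toNat ∧
      ∀ i : Nat, st + 1 ≤ i → i < (PySem.Chars.findFrom low p ((st + 1 : Nat) : Int)).toNat → ¬ p <+: low.drop i := by
    intro p _ hne
    have h := PySem.Chars.findFrom_natCast_spec low p (st + 1) hk hne
    exact ⟨h.1, h.2.1, fun i h1 h2 => h.2.2 i h1 h2⟩
  have hFeq : ∀ p ∈ pvMarkers, (PySem.Chars.findFrom low p ((st + 1 : Nat) : Int) = -1 ↔ ¬ p <:+: low.drop (st + 1)) :=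
    fun p _ => PySem.Chars.findFrom_natCast_eq_neg_one_iff low p (st + 1) hk
  set ends := ([PySem.Chars.findFrom low "appendix c:".toList ((st + 1 : Nat) : Int),
       PySem.Chars.findFrom low "appendix d:".toList ((st + 1 : Nat) : Int),
       PySem.Chars.findFrom low "appendix e:".toList ((st + 1 : Nat) : Int),
       PySem.Chars.findFrom low "appendix f:".toList ((st + 1 : Nat) : Int)].filter
         (fun e => decide ((st : Int) < e))) with hends
  have hmem_ends : ∀ p ∈ pvMarkers, PySem.Chars.findFrom low p ((st + 1 : Nat) : Int) ≠ -1 →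
      PySem.Chars.findFrom low p ((st + 1 : Nat) : Int) ∈ ends := by
    intro p hp hne
    rw [hends, List.mem_filter]
    constructor
    · fin_cases hp <;> simp
    · have h := (hFne p hp hne).1
      simp only [decide_eq_true_eq]
      omega
  have hends_src : ∀ m ∈ ends, ∃ p ∈ pvMarkers,
      PySem.Chars.findFrom low p ((st + 1 : Nat) : Int) = m ∧ (st : Int) < m := by
    intro m hm
    rw [hends, List.mem_filter] at hm
    obtain ⟨hm1, hm2⟩ := hm
    simp only [List.mem_cons, List.not_mem_nil, or_false] at hm1
    simp only [decide_eq_true_eq] at hm2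
    rcases hm1 with h | h | h | h
    · exact ⟨_, by simp [pvMarkers], h.symm, hm2⟩
    · exact ⟨_, by simp [pvMarkers], h.symm, hm2⟩
    · exact ⟨_, by simp [pvMarkers], h.symm, hm2⟩
    · exact ⟨_, by simp [pvMarkers], h.symm, hm2⟩
  rcases hmin : PySem.List.min? ends (fun x => x) with _ | m
  · have hnil : ends = [] := (PySem.List.min?_eq_none_iff ends _).mp hmin
    have hno : ∀ j, st + 1 ≤ j → j < s.length → ¬ pvMatchAt low j := by
      rintro j hj1 hj2 ⟨p, hp, hpre⟩
      have hne : PySem.Chars.findFrom low p ((st + 1 : Nat) : Int) ≠ -1 := by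
        intro heq
        exact ((hFeq p hp).mp heq) ((pv_infix_drop p low (st + 1)).mpr ⟨j, hj1, hpre⟩)
      have h := hmem_ends p hp hne
      rw [hnil] at h
      exact List.not_mem_nil h
    rw [pvScanB_no s low st (st + 1) hno]
    rw [show ((s.length : Int)) = ((s.length : Nat) : Int) from rfl, PySem.List.slice_natCast]
    apply List.take_of_length_le
    simp [List.length_drop]
  · obtain ⟨p, hp, hFp, hsm⟩ := hends_src m (PySem.List.min?_mem hmin)
    have hne : PySem.Chars.findFrom low p ((st + 1 : Nat) : Int) ≠ -1 := by rw [hFp]; omega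
    obtain ⟨hge, hpre, hminspec⟩ := hFne p hp hne
    rw [hFp] at hge hpre hminspec
    have hm0 : 0 ≤ m := by omega
    have hmcast : m = (m.toNat : Int) := (Int.toNat_of_nonneg hm0).symm
    have hgeN : st + 1 ≤ m.toNat := by
      push_cast at hge
      omega
    have hmlt : m.toNat < s.length := by
      have h1 := hpre.length_le
      have h2 : p.length = 11 := by fin_cases hp <;> decide
      simp only [List.length_drop] at h1
      omega
    have hmatch : pvMatchAt low m.toNat := ⟨p, hp, hpre⟩
    have hminall : ∀ k, st + 1 ≤ k → k < m.toNat → ¬ pvMatchAt low k := by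
      rintro k hk1 hk2 ⟨q, hq, hqpre⟩
      have hqne : PySem.Chars.findFrom low q ((st + 1 : Nat) : Int) ≠ -1 := by
        intro heq
        exact ((hFeq q hq).mp heq) ((pv_infix_drop q low (st + 1)).mpr ⟨k, hk1, hqpre⟩)
      have hqmem := hmem_ends q hq hqne
      have hmle : m ≤ PySem.Chars.findFrom low q ((st + 1 : Nat) : Int) := PySem.List.min?_isMin hmin _ hqmem
      obtain ⟨_, _, hqminspec⟩ := hFne q hq hqne
      exact hqminspec k hk1 (by omega) hqpre
    rw [pvScanB_yes s low st (st + 1) m.toNat hgeN hmlt hmatch hminall]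
    rw [← hmcast]

-- ===== VERDICT (by name: the statement is the Claim_ definition above) =====
theorem extract_appendix_b_slice_py_spec : Claim_equal_extract_appendix_b_slice_py := by
  intro rt _
  unfold Spec_extract_appendix_b_slice_py
  simp only [extract_appendix_b_slice_py, extract_appendix_b_slice_py_alt]
  by_cases hneg : PySem.Chars.find (PySem.Chars.lower rt.toList) "appendix b:".toList < 0
  · rw [if_pos hneg, if_pos hneg]
  · rw [if_neg hneg, if_neg hneg]
    have h0 : 0 ≤ PySem.Chars.find (PySem.Chars.lower rt.toList) "appendix b:".toList := not_lt.mp hneg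
    exact congrArg String.ofList
      (pv_body rt.toList (PySem.Chars.lower rt.toList) _ h0
        (by simp [PySem.Chars.lower]) (PySem.Chars.find_spec h0).1)
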